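-- pv_equiv track=rewrite | github.com/Dagobert42/Prompt-Based-Data-Augmentation-for-Semantic-Frames | helpers/text_processing.py | tag_exemplar
-- ===== SOURCE A (Python) =====
-- def tag_exemplar(sentence, labels):
--     sample = ""
--     # TODO: let user define null label
--     last_label = "null"
--
--     for word, label in zip(sentence, labels):
--         if label != last_label and last_label != "null":
--                 sample += f"</{last_label}> "
--         if label != last_label and label != "null":
--                 sample += f"<{label}> "
--         sample += word + " "
--         last_label = label
--
--     sample = sample.strip(" . ")
--     if last_label != "null":
--         sample += f" </{last_label}> "
--     return sample + '.'
-- ===== SOURCE B (Python) =====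
-- def _runs(pairs):
--     # split the zipped (word, label) pairs into maximal runs of equal labels
--     runs = []
--     i = 0
--     n = len(pairs)
--     while i < n:
--         lab = pairs[i][1]
--         j = i
--         while j < n and pairs[j][1] == lab:
--             j += 1
--         runs.append((lab, [w for w, _ in pairs[i:j]]))
--         i = j
--     return runs
--
--
-- def _render(runs):
--     # render each run: open tag, words, close tag (the last run is left open)
--     s = ""
--     for k, (lab, words) in enumerate(runs):
--         if lab != "null":
--             s += "<" + lab + "> "
--         for w in words:
--             s += w + " "
--         if lab != "null" and k + 1 < len(runs):
--             s += "</" + lab + "> "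
--     return s
--
--
-- def tag_exemplar(sentence, labels):
--     runs = _runs(list(zip(sentence, labels)))
--     sample = _render(runs).strip(" . ")
--     if runs and runs[-1][0] != "null":
--         sample += " </" + runs[-1][0] + "> "
--     return sample + '.'
-- ===== Notes on version B (the rewrite author's own statement) =====
-- stated objective: idiomatic
-- what changed: Replaces A's per-word lookback state machine with a two-phase decomposition: first split the zipped pairs into maximal runs of equal labels, then render each run with its open tag, words and close tag (leaving the last run open), reusing the same strip/final-close tail.
import Mathlib
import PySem

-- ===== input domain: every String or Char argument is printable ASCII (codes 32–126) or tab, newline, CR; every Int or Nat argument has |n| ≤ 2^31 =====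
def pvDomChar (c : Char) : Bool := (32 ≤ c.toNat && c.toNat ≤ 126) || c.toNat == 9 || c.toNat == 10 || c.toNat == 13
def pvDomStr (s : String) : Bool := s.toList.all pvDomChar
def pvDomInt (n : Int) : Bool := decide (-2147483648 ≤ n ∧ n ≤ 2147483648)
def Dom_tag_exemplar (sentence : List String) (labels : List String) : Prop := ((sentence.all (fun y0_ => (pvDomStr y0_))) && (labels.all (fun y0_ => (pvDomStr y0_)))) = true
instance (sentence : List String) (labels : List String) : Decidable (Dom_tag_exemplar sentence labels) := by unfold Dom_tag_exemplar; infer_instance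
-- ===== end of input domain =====

-- B replaces A's per-word lookback state machine with an explicit runs-of-equal-labels decomposition (idiomatic, same cost).

-- ===== PORT A =====
-- the loop body of A, one step per (word, label) pair; state = (sample, last_label)
def pvAStep (st : String × String) (wl : String × String) : String × String :=
  let sample := st.1
  let last_label := st.2
  let word := wl.1
  let label := wl.2
  let sample := if label != last_label && last_label != "null" then sample ++ "</" ++ last_label ++ "> " else sample
  let sample := if label != last_label && label != "null" then sample ++ "<" ++ label ++ "> " else sample
  (sample ++ word ++ " ", label)

def tag_exemplar (sentence : List String) (labels : List String) : String :=
  let st := (sentence.zip labels).foldl pvAStep ("", "null")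
  let sample := PySem.Str.stripChars st.1 " . "
  let sample := if st.2 != "null" then sample ++ " </" ++ st.2 ++ "> " else sample
  sample ++ "."

-- ===== PORT B =====
-- _runs: split the zipped pairs into maximal runs of equal labels
def pvRuns : List (String × String) → List (String × List String)
  | [] => []
  | (w, l) :: rest =>
    (l, w :: (rest.takeWhile (fun p => p.2 == l)).map Prod.fst) :: pvRuns (rest.dropWhile (fun p => p.2 == l))
termination_by ps => ps.length
decreasing_by
  simp only [List.length_cons]
  exact Nat.lt_succ_of_le (List.length_dropWhile_le _ _)

-- _render: open tag, words, close tag (the last run is left open)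
def pvRender : List (String × List String) → String
  | [] => ""
  | (lab, ws) :: rest =>
    let s := ""
    let s := if lab != "null" then s ++ "<" ++ lab ++ "> " else s
    let s := ws.foldl (fun a w => a ++ w ++ " ") s
    let s := if lab != "null" && !rest.isEmpty then s ++ "</" ++ lab ++ "> " else s
    s ++ pvRender rest

def tag_exemplar_alt (sentence : List String) (labels : List String) : String :=
  let runs := pvRuns ((sentence.zip labels))
  let sample := PySem.Str.stripChars (pvRender runs) " . "
  let sample :=
    match runs.getLast? with
    | some r => if r.1 != "null" then sample ++ " </" ++ r.1 ++ "> " else sample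
    | none => sample
  sample ++ "."

-- ===== PRECONDITION & SPEC =====
def Spec_tag_exemplar (sentence : List String) (labels : List String) (out : String) : Prop := out = tag_exemplar_alt sentence labels
instance (sentence : List String) (labels : List String) (out : String) : Decidable (Spec_tag_exemplar sentence labels out) := by unfold Spec_tag_exemplar; infer_instance

-- ===== CLAIM (what is proved, stated in full; the proofs are below) =====
def Claim_equal_tag_exemplar : Prop := ∀ (sentence : List String) (labels : List String), Dom_tag_exemplar sentence labels → Spec_tag_exemplar sentence labels (tag_exemplar sentence labels)

-- ===== LEMMAS AND PROOFS =====

-- the within-run word accumulator, and the A-loop characterised run by run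
def pvW (ws : List String) : String := ws.foldl (fun a w => a ++ w ++ " ") ""

def pvLastOf (prev : String) (ps : List (String × String)) : String :=
  ps.foldl (fun _ p => p.2) prev

-- A's interleaving written per run: close the previous label, open this one, words, recurse
def pvRenderFrom (prev : String) : List (String × List String) → String
  | [] => ""
  | (lab, ws) :: rest =>
    (if prev != "null" then "</" ++ prev ++ "> " else "") ++
    (if lab != "null" then "<" ++ lab ++ "> " else "") ++
    pvW ws ++ pvRenderFrom lab rest

theorem pvW_foldl (ws : List String) (s : String) :
    ws.foldl (fun a w => a ++ w ++ " ") s = s ++ pvW ws := by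
  induction ws generalizing s with
  | nil => simp [pvW]
  | cons w ws ih =>
    simp only [List.foldl_cons, pvW]
    rw [ih, ih (("" : String) ++ w ++ " ")]
    simp [String.append_assoc]

theorem pvW_cons (w : String) (ws : List String) :
    pvW (w :: ws) = w ++ " " ++ pvW ws := by
  rw [pvW, List.foldl_cons, pvW_foldl]
  simp [pvW]

theorem pv_run_fold (ps : List (String × String)) (lab : String)
    (h : ∀ p ∈ ps, p.2 = lab) (s : String) :
    ps.foldl pvAStep (s, lab) = (s ++ pvW (ps.map Prod.fst), lab) := by
  induction ps generalizing s with
  | nil => simp [pvW]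
  | cons p ps ih =>
    have hp : p.2 = lab := h p (List.mem_cons_self ..)
    simp only [List.foldl_cons, pvAStep, hp, bne_self_eq_false, Bool.false_and, if_neg Bool.false_ne_true]
    rw [ih (fun q hq => h q (List.mem_cons_of_mem _ hq)), List.map_cons, pvW_cons]
    simp [String.append_assoc]

theorem pv_lastOf_run (ps : List (String × String)) (lab : String)
    (h : ∀ p ∈ ps, p.2 = lab) : pvLastOf lab ps = lab := by
  induction ps with
  | nil => rfl
  | cons p ps ih =>
    simp only [pvLastOf, List.foldl_cons] at *
    rw [h p (List.mem_cons_self ..)]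
    exact ih (fun q hq => h q (List.mem_cons_of_mem _ hq))

theorem pv_head_dropWhile {α : Type} (p : α → Bool) (l : List α) :
    ∀ x ∈ (l.dropWhile p).head?, p x = false := by
  induction l with
  | nil => simp
  | cons a l ih =>
    intro x hx
    by_cases hpa : p a
    · rw [List.dropWhile_cons_of_pos hpa] at hx; exact ih x hx
    · rw [List.dropWhile_cons_of_neg hpa] at hx
      simp only [List.head?_cons, Option.mem_some_iff] at hx
      subst hx; simpa using hpa

theorem pv_loop_spec (ps : List (String × String)) :
    ∀ s prev, (∀ p ∈ ps.head?, prev = "null" ∨ p.2 ≠ prev) →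
    ps.foldl pvAStep (s, prev) = (s ++ pvRenderFrom prev (pvRuns ps), pvLastOf prev ps) := by
  induction ps using pvRuns.induct with
  | case1 => intro s prev _; simp [pvRenderFrom, pvRuns, pvLastOf]
  | case2 w l rest ih =>
    intro s prev hh
    have hl : prev = "null" ∨ l ≠ prev := by
      have := hh (w, l); simpa using this
    -- the first step of the loop
    have hclose : (l != prev && prev != "null") = (prev != "null") := by
      rcases hl with h | h
      · subst h; simp
      · simp [bne_iff_ne, h]
    have hopen : (l != prev && l != "null") = (l != "null") := by
      by_cases hlp : l = prev
      · rcases hl with h | h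
        · subst h; simp [hlp]
        · exact absurd hlp h
      · simp [bne_iff_ne, hlp]
    have hstep : pvAStep (s, prev) (w, l) =
        ((s ++ (if prev != "null" then "</" ++ prev ++ "> " else "")
           ++ (if l != "null" then "<" ++ l ++ "> " else "")) ++ w ++ " ", l) := by
      simp only [pvAStep, hclose, hopen]
      split_ifs <;> simp [← String.append_assoc]
    -- split the tail into the rest of this run and the remainder
    have hsplit : rest = rest.takeWhile (fun p => p.2 == l) ++ rest.dropWhile (fun p => p.2 == l) :=
      (List.takeWhile_append_dropWhile ..).symm
    have htake : ∀ p ∈ rest.takeWhile (fun p => p.2 == l), p.2 = l := by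
      intro p hp
      have := List.mem_takeWhile_imp hp
      simpa using this
    have hdrop : ∀ p ∈ (rest.dropWhile (fun p => p.2 == l)).head?, l = "null" ∨ p.2 ≠ l := by
      intro p hp
      have := pv_head_dropWhile (fun p => p.2 == l) rest p hp
      right; simpa using this
    simp only [List.foldl_cons, hstep]
    conv_lhs => rw [hsplit]
    rw [List.foldl_append, pv_run_fold _ _ htake, ih _ _ hdrop]
    rw [Prod.mk.injEq]
    refine ⟨?_, ?_⟩
    · show _ = s ++ pvRenderFrom prev (pvRuns ((w, l) :: rest))
      rw [pvRuns]
      show _ = s ++ pvRenderFrom prev ((l, w :: _) :: _)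
      rw [pvRenderFrom, pvW_cons]
      simp [String.append_assoc]
    · show _ = pvLastOf prev ((w, l) :: rest)
      conv_rhs => rw [show ((w, l) :: rest) = ((w, l) :: rest.takeWhile (fun p => p.2 == l)) ++ rest.dropWhile (fun p => p.2 == l) by rw [List.cons_append, ← hsplit]]
      simp only [pvLastOf, List.foldl_append, List.foldl_cons]
      congr 1
      exact (pv_lastOf_run _ _ htake).symm

theorem pv_renderFrom_eq (rs : List (String × List String)) :
    ∀ prev, pvRenderFrom prev rs =
      (if prev != "null" && !rs.isEmpty then "</" ++ prev ++ "> " else "") ++ pvRender rs := by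
  induction rs with
  | nil => intro prev; simp [pvRenderFrom, pvRender]
  | cons r rest ih =>
    intro prev
    obtain ⟨lab, ws⟩ := r
    rw [pvRenderFrom, pvRender, ih lab]
    simp only [List.isEmpty_cons, Bool.not_false, Bool.and_true]
    rw [pvW_foldl]
    split_ifs <;> simp_all [pvW, String.append_assoc]

theorem pv_lastOf_runs (ps : List (String × String)) :
    ∀ prev, pvLastOf prev ps =
      (match (pvRuns ps).getLast? with | none => prev | some r => r.1) := by
  induction ps using pvRuns.induct with
  | case1 => intro prev; simp [pvLastOf, pvRuns]
  | case2 w l rest ih =>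
    intro prev
    have hsplit : rest = rest.takeWhile (fun p => p.2 == l) ++ rest.dropWhile (fun p => p.2 == l) :=
      (List.takeWhile_append_dropWhile ..).symm
    have htake : ∀ p ∈ rest.takeWhile (fun p => p.2 == l), p.2 = l := by
      intro p hp; have := List.mem_takeWhile_imp hp; simpa using this
    have hstep : pvLastOf prev ((w, l) :: rest) = pvLastOf l (rest.dropWhile (fun p => p.2 == l)) := by
      conv_lhs => rw [show ((w, l) :: rest) = ((w, l) :: rest.takeWhile (fun p => p.2 == l)) ++ rest.dropWhile (fun p => p.2 == l) by rw [List.cons_append, ← hsplit]]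
      simp only [pvLastOf, List.foldl_append, List.foldl_cons]
      congr 1
      exact pv_lastOf_run _ _ htake
    rw [hstep, ih, pvRuns]
    cases h : pvRuns (rest.dropWhile (fun p => p.2 == l)) with
    | nil => simp
    | cons b bs =>
      rw [List.getLast?_cons_cons]
      cases hgl : (b :: bs).getLast? with
      | none => simp [List.getLast?_eq_none_iff] at hgl
      | some x => rfl


-- ===== VERDICT (by name: the statement is the Claim_ definition above) =====
theorem tag_exemplar_spec : Claim_equal_tag_exemplar := by
  intro sentence labels _
  show tag_exemplar sentence labels = tag_exemplar_alt sentence labels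
  unfold tag_exemplar tag_exemplar_alt
  have h := pv_loop_spec (sentence.zip labels) "" "null" (by intro p _; left; rfl)
  rw [h, pv_renderFrom_eq]
  have hlast := pv_lastOf_runs (sentence.zip labels) "null"
  simp only [bne_self_eq_false, Bool.false_and, if_neg Bool.false_ne_true, String.empty_append, hlast]
  cases (pvRuns (sentence.zip labels)).getLast? with
  | none => simp
  | some r => rfl
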